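-- pv_equiv track=rewrite | github.com/KhantsevaAA/ITAM.Python | hm_chapter-2/homework_2_B.py | key_difference
-- ===== SOURCE A (Python) =====
-- def key_difference(dict1, dict2):
--     dict3 = dict()
--     f = False
--     for key1, value1 in dict1.items():
--         if key1 in dict2.keys():
--             if value1 == dict2[key1]:
--                 dict3[key1] = 'equal'
--             else:
--                 dict3[key1] = 'changed'
--         else:
--             dict3[key1] = 'deleted'
--     for key2, value2 in dict2.items():
--         if key2 not in dict1.keys():
--             dict3[key2] = 'added'
--     return dict3
-- ===== SOURCE B (Python) =====
-- def key_difference(dict1, dict2):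
--     s1 = sorted(dict1)
--     s2 = sorted(dict2)
--     cls = {}
--     i = j = 0
--     while i < len(s1) and j < len(s2):
--         a, b = s1[i], s2[j]
--         if a == b:
--             cls[a] = 'equal' if dict1[a] == dict2[a] else 'changed'
--             i += 1
--             j += 1
--         elif a < b:
--             cls[a] = 'deleted'
--             i += 1
--         else:
--             cls[b] = 'added'
--             j += 1
--     for k in s2[j:]:
--         cls[k] = 'added'
--     for k in s1[i:]:
--         cls[k] = 'deleted'
--     order = list(dict1) + [k for k in dict2 if k not in dict1]
--     return {k: cls[k] for k in order}
-- ===== Notes on version B (the rewrite author's own statement) =====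
-- stated objective: alternative
-- what changed: Replaces A's per-key hash-membership branching with a sort-merge join: both key lists are sorted and a two-pointer merge classifies every key as equal/changed/deleted/added, after which a separate ordering pass emits the classification in dict order.
import Mathlib
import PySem

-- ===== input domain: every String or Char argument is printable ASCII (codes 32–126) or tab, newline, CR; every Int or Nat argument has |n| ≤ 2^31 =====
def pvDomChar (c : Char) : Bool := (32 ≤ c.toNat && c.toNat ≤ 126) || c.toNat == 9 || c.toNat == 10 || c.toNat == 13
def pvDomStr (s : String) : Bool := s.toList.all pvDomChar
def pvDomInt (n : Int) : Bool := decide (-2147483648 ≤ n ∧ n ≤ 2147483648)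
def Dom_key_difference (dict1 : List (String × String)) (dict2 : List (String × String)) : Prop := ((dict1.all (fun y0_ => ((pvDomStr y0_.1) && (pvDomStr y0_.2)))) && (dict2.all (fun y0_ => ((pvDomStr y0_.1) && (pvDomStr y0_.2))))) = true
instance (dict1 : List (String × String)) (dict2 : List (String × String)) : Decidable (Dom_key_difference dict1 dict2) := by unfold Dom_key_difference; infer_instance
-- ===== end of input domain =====

-- B replaces A's per-key membership branching by a sort-merge join over the two sorted key
-- lists plus a separate ordering pass: a genuinely different algorithm of similar cost.


-- ===== PORT A =====
def key_difference (dict1 : List (String × String)) (dict2 : List (String × String)) : List (String × String) :=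
  let d1 : PySem.Dict String String := PySem.Dict.ofList dict1
  let d2 : PySem.Dict String String := PySem.Dict.ofList dict2
  let d3 : PySem.Dict String String :=
    d1.items.foldl (fun d3 p =>
      if d2.contains p.1 then
        if d2.get? p.1 = some p.2 then d3.insert p.1 "equal"
        else d3.insert p.1 "changed"
      else d3.insert p.1 "deleted") PySem.Dict.empty
  let d3' : PySem.Dict String String :=
    d2.items.foldl (fun d3 p =>
      if !(d1.contains p.1) then d3.insert p.1 "added" else d3) d3
  d3'.items

-- ===== PORT B =====
-- the two-pointer merge over the sorted key lists (Source B's while loop; the base cases are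
-- Source B's two trailing for-loops over the remaining slices, one of which is always empty)
def mergeCls (d1 d2 : PySem.Dict String String) :
    List String → List String → PySem.Dict String String → PySem.Dict String String
  | [], s2, cls => s2.foldl (fun c k => c.insert k "added") cls
  | a :: s1', [], cls => (a :: s1').foldl (fun c k => c.insert k "deleted") cls
  | a :: s1', b :: s2', cls =>
      if a = b then
        mergeCls d1 d2 s1' s2'
          (cls.insert a (if d1.getD a "" = d2.getD a "" then "equal" else "changed"))
      else if a < b then mergeCls d1 d2 s1' (b :: s2') (cls.insert a "deleted")
      else mergeCls d1 d2 (a :: s1') s2' (cls.insert b "added")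
  termination_by s1 s2 _ => s1.length + s2.length
  decreasing_by all_goals (simp only [List.length_cons]; omega)

def key_difference_alt (dict1 : List (String × String)) (dict2 : List (String × String)) : List (String × String) :=
  let d1 : PySem.Dict String String := PySem.Dict.ofList dict1
  let d2 : PySem.Dict String String := PySem.Dict.ofList dict2
  let s1 := PySem.List.sorted d1.keys (fun x => x) false
  let s2 := PySem.List.sorted d2.keys (fun x => x) false
  let cls := mergeCls d1 d2 s1 s2 PySem.Dict.empty
  let order := d1.keys ++ d2.keys.filter (fun k => !(d1.contains k))
  (order.foldl (fun out k => out.insert k (cls.getD k "")) PySem.Dict.empty).items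

-- ===== PRECONDITION & SPEC =====
def Spec_key_difference (dict1 : List (String × String)) (dict2 : List (String × String)) (out : List (String × String)) : Prop := out = key_difference_alt dict1 dict2
instance (dict1 : List (String × String)) (dict2 : List (String × String)) (out : List (String × String)) : Decidable (Spec_key_difference dict1 dict2 out) := by unfold Spec_key_difference; infer_instance

-- ===== CLAIM (what is proved, stated in full; the proofs are below) =====
def Claim_equal_key_difference : Prop := ∀ (dict1 : List (String × String)) (dict2 : List (String × String)), Dom_key_difference dict1 dict2 → Spec_key_difference dict1 dict2 (key_difference dict1 dict2)

-- ===== LEMMAS AND PROOFS =====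

theorem getD_foldl_insert_const (l : List String) (v : String)
    (acc : PySem.Dict String String) (x dflt : String) :
    (l.foldl (fun c k => c.insert k v) acc).getD x dflt
      = if x ∈ l then v else acc.getD x dflt := by
  induction l generalizing acc with
  | nil => simp
  | cons h t ih =>
    simp only [List.foldl_cons, ih, List.mem_cons, PySem.Dict.getD_insert]
    by_cases hx : x ∈ t
    · simp [hx]
    · by_cases hxh : x = h <;> simp [hx, hxh]

theorem mergeCls_getD (d1 d2 : PySem.Dict String String)
    (s1 s2 : List String) (acc : PySem.Dict String String)
    (h1 : s1.Pairwise (· < ·)) (h2 : s2.Pairwise (· < ·)) (k dflt : String) :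
    (mergeCls d1 d2 s1 s2 acc).getD k dflt
      = if k ∈ s1 then
          (if k ∈ s2 then (if d1.getD k "" = d2.getD k "" then "equal" else "changed")
           else "deleted")
        else if k ∈ s2 then "added" else acc.getD k dflt := by
  fun_induction mergeCls d1 d2 s1 s2 acc with
  | case1 s2 cls => simp [getD_foldl_insert_const]
  | case2 a s1' cls => rw [getD_foldl_insert_const]; simp
  | case3 s1' b s2' cls ih =>
    simp only [dite_eq_ite] at ih
    rw [ih ((List.pairwise_cons.mp h1).2) ((List.pairwise_cons.mp h2).2)]
    have ha1 : b ∉ s1' := fun h => lt_irrefl b ((List.pairwise_cons.mp h1).1 b h)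
    have ha2 : b ∉ s2' := fun h => lt_irrefl b ((List.pairwise_cons.mp h2).1 b h)
    by_cases hk : k = b
    · subst hk; simp [ha1, ha2]
    · simp [List.mem_cons, hk, PySem.Dict.getD_insert]
  | case4 a s1' b s2' cls hab hlt ih =>
    rw [ih ((List.pairwise_cons.mp h1).2) h2]
    have ha1 : a ∉ s1' := fun h => lt_irrefl a ((List.pairwise_cons.mp h1).1 a h)
    have ha2 : a ∉ b :: s2' := by
      intro h
      rcases List.mem_cons.mp h with h | h
      · exact hab h
      · exact lt_irrefl a (lt_trans hlt ((List.pairwise_cons.mp h2).1 a h))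
    by_cases hk : k = a
    · subst hk; simp [ha1, List.mem_cons.not.mp ha2]
    · simp [List.mem_cons, hk, PySem.Dict.getD_insert]
  | case5 a s1' b s2' cls hab hnlt ih =>
    rw [ih h1 ((List.pairwise_cons.mp h2).2)]
    have hba : b < a := lt_of_le_of_ne (not_lt.mp hnlt) (fun h => hab h.symm)
    have hb2 : b ∉ s2' := fun h => lt_irrefl b ((List.pairwise_cons.mp h2).1 b h)
    have hb1 : b ∉ a :: s1' := by
      intro h
      rcases List.mem_cons.mp h with h | h
      · exact hab h.symm
      · exact lt_irrefl b (lt_trans hba ((List.pairwise_cons.mp h1).1 b h))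
    by_cases hk : k = b
    · subst hk; simp [List.mem_cons.not.mp hb1, hb2]
    · simp [List.mem_cons, hk, PySem.Dict.getD_insert]

theorem key_difference_eq (dict1 dict2 : List (String × String)) :
    key_difference dict1 dict2 = key_difference_alt dict1 dict2 := by
  unfold key_difference key_difference_alt
  set d1 : PySem.Dict String String := PySem.Dict.ofList dict1 with hd1
  set d2 : PySem.Dict String String := PySem.Dict.ofList dict2 with hd2
  simp only []
  set labA : String × String → String := fun p =>
    if d2.contains p.1 then (if d2.get? p.1 = some p.2 then "equal" else "changed") else "deleted" with hlabA
  set labB : String → String := fun k =>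
    if !(d1.contains k) then "added"
    else if !(d2.contains k) then "deleted"
    else if d1.getD k "" = d2.getD k "" then "equal"
    else "changed" with hlabB
  have hn1 : d1.keys.Nodup := PySem.Dict.nodup_keys_ofList dict1
  have hn2 : d2.keys.Nodup := PySem.Dict.nodup_keys_ofList dict2
  -- ===== A side: A's two loops produce the merged key sequence with labels labA/"added" =====
  have hbody : (fun (d3 : PySem.Dict String String) (p : String × String) =>
      if d2.contains p.1 then
        if d2.get? p.1 = some p.2 then d3.insert p.1 "equal"
        else d3.insert p.1 "changed"
      else d3.insert p.1 "deleted")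
      = fun d3 p => d3.insert p.1 (labA p) := by
    funext d3 p; simp only [hlabA]; split_ifs <;> rfl
  rw [hbody]
  have hkeys1 : d1.items.map Prod.fst = d1.keys := rfl
  have hA1 : (d1.items.foldl (fun d3 p => d3.insert p.1 (labA p)) PySem.Dict.empty).items
      = d1.items.map (fun p => (p.1, labA p)) := by
    rw [PySem.Dict.items_foldl_insert_fresh d1.items Prod.fst labA PySem.Dict.empty
      (by intro a _; simp [PySem.Dict.contains_empty])
      (by rw [hkeys1]; exact hn1)]
    simp [PySem.Dict.empty]
  set A1 := d1.items.foldl (fun d3 p => d3.insert p.1 (labA p)) PySem.Dict.empty with hA1d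
  have hA1keys : A1.keys = d1.keys := by
    rw [hA1d, PySem.Dict.keys_foldl_insert_key d1.items Prod.fst (fun _ p => labA p) PySem.Dict.empty]
    rw [hkeys1]
    simp [PySem.Dict.keys_empty, PySem.Set.update_nil_left,
      PySem.Set.ofList_eq_self_of_nodup d1.keys hn1]
  have hfilter : (d2.items.foldl (fun d3 p => if !(d1.contains p.1) then d3.insert p.1 "added" else d3) A1)
      = (d2.items.filter (fun p => !(d1.contains p.1))).foldl (fun d3 p => d3.insert p.1 "added") A1 := by
    rw [List.foldl_filter]
  set l2 := d2.items.filter (fun p => !(d1.contains p.1)) with hl2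
  have hl2keys : l2.map Prod.fst = d2.keys.filter (fun k => !(d1.contains k)) := by
    rw [hl2]
    have := @List.filter_map (String × String) String Prod.fst (fun k => !(d1.contains k)) d2.items
    exact this.symm
  have hl2fresh : ∀ p ∈ l2, A1.contains p.1 = false := by
    intro p hp
    have hc : (!(d1.contains p.1)) = true := (List.mem_filter.mp hp).2
    have : d1.contains p.1 = false := by simpa using hc
    rw [← Bool.not_eq_true, PySem.Dict.contains_iff_mem_keys, hA1keys]
    rw [← PySem.Dict.contains_iff_mem_keys]
    simp [this]
  have hl2nodup : (l2.map Prod.fst).Nodup := by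
    rw [hl2keys]; exact hn2.filter _
  have hA2 : ((d2.items.foldl (fun d3 p => if !(d1.contains p.1) then d3.insert p.1 "added" else d3) A1)).items
      = d1.items.map (fun p => (p.1, labA p)) ++ l2.map (fun p => (p.1, "added")) := by
    rw [hfilter, PySem.Dict.items_foldl_insert_fresh l2 Prod.fst (fun _ => "added") A1 hl2fresh hl2nodup, hA1]
  rw [hA2]
  -- ===== B side: the merge join computes labB pointwise, the ordering pass lists it =====
  set s1 := PySem.List.sorted d1.keys (fun x => x) false with hs1
  set s2 := PySem.List.sorted d2.keys (fun x => x) false with hs2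
  set cls := mergeCls d1 d2 s1 s2 PySem.Dict.empty with hcls
  set keysB := d1.keys ++ d2.keys.filter (fun k => !(d1.contains k)) with hkB
  have hkBnodup : (keysB.map id).Nodup := by
    rw [List.map_id, hkB]
    refine List.Nodup.append hn1 (hn2.filter _) ?_
    intro k hk1 hk2
    have hc : (!(d1.contains k)) = true := (List.mem_filter.mp hk2).2
    exact (by simpa using hc : ¬ (d1.contains k = true)) ((PySem.Dict.contains_iff_mem_keys d1 k).mpr hk1)
  have hB : (keysB.foldl (fun out k => out.insert k (cls.getD k "")) PySem.Dict.empty).items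
      = keysB.map (fun k => (k, cls.getD k "")) := by
    have := PySem.Dict.items_foldl_insert_fresh keysB id (fun k => cls.getD k "") PySem.Dict.empty
      (by intro a _; simp [PySem.Dict.contains_empty]) hkBnodup
    simpa [PySem.Dict.empty] using this
  -- strictly sorted key lists
  have hp1 : s1.Pairwise (· < ·) := by
    have hperm : s1.Perm d1.keys := PySem.List.sorted_perm d1.keys (fun x => x) false
    have hle : s1.Pairwise (fun a b => a ≤ b) := by
      simpa using PySem.List.sorted_pairwise d1.keys (fun x => x)
    have hnd : s1.Nodup := hperm.nodup_iff.mpr hn1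
    exact (hle.and hnd).imp (fun {a b} h => lt_of_le_of_ne h.1 h.2)
  have hp2 : s2.Pairwise (· < ·) := by
    have hperm : s2.Perm d2.keys := PySem.List.sorted_perm d2.keys (fun x => x) false
    have hle : s2.Pairwise (fun a b => a ≤ b) := by
      simpa using PySem.List.sorted_pairwise d2.keys (fun x => x)
    have hnd : s2.Nodup := hperm.nodup_iff.mpr hn2
    exact (hle.and hnd).imp (fun {a b} h => lt_of_le_of_ne h.1 h.2)
  have hmem1 : ∀ k, k ∈ s1 ↔ k ∈ d1.keys := by
    intro k; rw [hs1]; exact PySem.List.mem_sorted d1.keys (fun x => x) false k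
  have hmem2 : ∀ k, k ∈ s2 ↔ k ∈ d2.keys := by
    intro k; rw [hs2]; exact PySem.List.mem_sorted d2.keys (fun x => x) false k
  -- the merge's classification agrees with labB on every key of the output
  have hclsk : ∀ k ∈ keysB, cls.getD k "" = labB k := by
    intro k hk
    rw [hcls, mergeCls_getD d1 d2 s1 s2 PySem.Dict.empty hp1 hp2 k ""]
    have hmemB : k ∈ d1.keys ∨ k ∈ d2.keys := by
      rcases List.mem_append.mp (hkB ▸ hk) with h | h
      · exact Or.inl h
      · exact Or.inr (List.mem_filter.mp h).1
    simp only [hlabB, hmem1, hmem2, ← PySem.Dict.contains_iff_mem_keys]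
    rcases hc1 : d1.contains k with _ | _ <;> rcases hc2 : d2.contains k with _ | _
    · rcases hmemB with h | h
      · exact absurd ((PySem.Dict.contains_iff_mem_keys d1 k).mpr h) (by simp [hc1])
      · exact absurd ((PySem.Dict.contains_iff_mem_keys d2 k).mpr h) (by simp [hc2])
    · simp
    · simp
    · simp
  rw [hB, hkB]
  have hBmap : (d1.keys ++ d2.keys.filter (fun k => !(d1.contains k))).map (fun k => (k, cls.getD k ""))
      = (d1.keys ++ d2.keys.filter (fun k => !(d1.contains k))).map (fun k => (k, labB k)) := by
    apply List.map_congr_left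
    intro k hk
    rw [hclsk k (hkB ▸ hk)]
  rw [hBmap, List.map_append, ← hkeys1, List.map_map, ← hl2keys, List.map_map]
  congr 1
  · apply List.map_congr_left
    intro p hp
    have hmem : p.1 ∈ d1.keys := by rw [← hkeys1]; exact List.mem_map_of_mem hp
    have hc1 : d1.contains p.1 = true := (PySem.Dict.contains_iff_mem_keys d1 p.1).mpr hmem
    have hget1 : d1.getD p.1 "" = p.2 := by
      have : (p.1, p.2) ∈ d1.items := hp
      exact PySem.Dict.getD_of_mem_items d1 this hn1 ""
    simp only [Function.comp, hlabB, hlabA, hc1, Bool.not_true]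
    by_cases hc2 : d2.contains p.1 = true
    · have hsome : (d2.get? p.1).isSome := by
        rw [← PySem.Dict.contains_eq_isSome_get?]; exact hc2
      obtain ⟨w, hw⟩ := Option.isSome_iff_exists.mp hsome
      have hgd2 : d2.getD p.1 "" = w := by
        rw [PySem.Dict.getD_eq_get?_getD, hw]; rfl
      simp only [hc2, hw, hgd2, hget1, if_false, Bool.false_eq_true, Option.some.injEq]
      by_cases hvw : p.2 = w
      · simp [hvw]
      · simp only [hvw, if_false]
        have : ¬ w = p.2 := fun h => hvw h.symm
        simp [this]
    · have hcf : d2.contains p.1 = false := by simpa using hc2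
      simp [hcf]
  · apply List.map_congr_left
    intro p hp
    have hc : (!(d1.contains p.1)) = true := (List.mem_filter.mp hp).2
    simp only [Function.comp, hlabB, hc]
    rfl

-- ===== VERDICT (by name: the statement is the Claim_ definition above) =====
theorem key_difference_spec : Claim_equal_key_difference := by
  intro dict1 dict2 _
  unfold Spec_key_difference
  exact key_difference_eq dict1 dict2
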